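-- pv_equiv track=rewrite | github.com/WeiDai-David/2025CVPR_GGEUR | Multi Domain/Office-Home-LDS/交叉索引.py | match_client_class_indices
-- ===== SOURCE A (Python) =====
-- def match_client_class_indices(client_indices, class_indices):
--     """
--     将客户端的索引与类索引匹配，生成客户端在每个类的索引
--     """
--     client_class_indices = {class_label: [] for class_label in class_indices.keys()}
--
--     for index in client_indices:
--         # 查找该索引属于哪个类
--         for class_label, class_idx_list in class_indices.items():
--             if index in class_idx_list:
--                 client_class_indices[class_label].append(index)
--                 break
--
--     return client_class_indices
-- ===== SOURCE B (Python) =====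
-- def match_client_class_indices(client_indices, class_indices):
--     """
--     Class-major pass: for each class in order, collect the client indices that
--     belong to it and were not claimed by an earlier class.
--     """
--     result = {}
--     earlier = set()
--     for class_label, idx_list in class_indices.items():
--         cset = set(idx_list)
--         result[class_label] = [i for i in client_indices if i in cset and i not in earlier]
--         earlier |= cset
--     return result
-- ===== Notes on version B (the rewrite author's own statement) =====
-- stated objective: alternative
-- what changed: A loops client-major and linearly scans each class's index list for every client index; B loops class-major, hashing each class list into a set once and filtering client_indices against it plus an accumulating 'earlier' set, so the per-index linear list scans disappear.
import Mathlib
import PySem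

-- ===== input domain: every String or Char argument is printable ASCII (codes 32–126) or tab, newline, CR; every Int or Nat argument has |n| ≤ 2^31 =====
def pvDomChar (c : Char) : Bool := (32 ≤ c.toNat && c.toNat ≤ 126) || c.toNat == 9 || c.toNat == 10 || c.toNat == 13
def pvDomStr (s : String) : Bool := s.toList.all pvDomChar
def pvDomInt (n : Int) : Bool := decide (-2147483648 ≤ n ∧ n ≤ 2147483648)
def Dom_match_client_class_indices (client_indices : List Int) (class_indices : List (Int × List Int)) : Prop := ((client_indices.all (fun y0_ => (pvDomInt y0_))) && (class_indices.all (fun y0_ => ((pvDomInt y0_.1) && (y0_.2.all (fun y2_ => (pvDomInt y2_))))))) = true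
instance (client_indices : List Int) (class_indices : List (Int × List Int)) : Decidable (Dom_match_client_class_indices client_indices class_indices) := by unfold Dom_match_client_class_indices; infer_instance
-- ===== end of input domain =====

-- B buckets client indices class-major with an accumulated "earlier" set instead of A's client-major scan; objective: alternative decomposition.


-- ===== PORT A =====
-- inner 'for class_label, class_idx_list in class_indices.items(): if index in class_idx_list: … break'
def findClass (index : Int) : List (Int × List Int) → Option Int
  | [] => none
  | (l, lst) :: rest => if index ∈ lst then some l else findClass index rest

def match_client_class_indices (client_indices : List Int) (class_indices : List (Int × List Int)) : List (Int × List Int) :=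
  -- client_class_indices = {label: [] for label in class_indices.keys()}
  let d0 : PySem.Dict Int (List Int) :=
    class_indices.foldl (fun d p => d.insert p.1 ([] : List Int)) PySem.Dict.empty
  -- for index in client_indices: … append to the first matching class's bucket
  let d := client_indices.foldl
    (fun d i =>
      match findClass i class_indices with
      | some l => d.modify l [] (fun v => v ++ [i])
      | none => d) d0
  d.items

-- ===== PORT B =====
-- for class_label, idx_list in class_indices.items(): bucket = [i for i in client if i in set(idx_list) and i not in earlier]; earlier |= set(idx_list)
def altGo (client : List Int) : PySem.Set Int → List (Int × List Int) → List (Int × List Int)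
  | _, [] => []
  | earlier, (label, lst) :: rest =>
    let cset : PySem.Set Int := PySem.Set.ofList lst
    (label, client.filter (fun i => PySem.Set.contains cset i && !(PySem.Set.contains earlier i))) ::
      altGo client (PySem.Set.update earlier lst) rest

def match_client_class_indices_alt (client_indices : List Int) (class_indices : List (Int × List Int)) : List (Int × List Int) :=
  altGo client_indices PySem.Set.empty class_indices

-- ===== PRECONDITION & SPEC =====
-- Pre_ excludes association lists with duplicate class labels, which cannot arise from the Python dict parameter class_indices.
def Pre_match_client_class_indices (client_indices : List Int) (class_indices : List (Int × List Int)) : Prop :=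
  (class_indices.map Prod.fst).Nodup
instance (client_indices : List Int) (class_indices : List (Int × List Int)) : Decidable (Pre_match_client_class_indices client_indices class_indices) := by unfold Pre_match_client_class_indices; infer_instance

def pvWitness_match_client_class_indices : List Int × (List (Int × List Int)) :=
  ([1, 2, 3, 2], [(0, [1, 2]), (1, [2, 3])])

def Spec_match_client_class_indices (client_indices : List Int) (class_indices : List (Int × List Int)) (out : List (Int × List Int)) : Prop := out = match_client_class_indices_alt client_indices class_indices
instance (client_indices : List Int) (class_indices : List (Int × List Int)) (out : List (Int × List Int)) : Decidable (Spec_match_client_class_indices client_indices class_indices out) := by unfold Spec_match_client_class_indices; infer_instance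

-- ===== CLAIM (what is proved, stated in full; the proofs are below) =====
def Claim_equal_match_client_class_indices : Prop := ∀ (client_indices : List Int) (class_indices : List (Int × List Int)), Dom_match_client_class_indices client_indices class_indices → Pre_match_client_class_indices client_indices class_indices → Spec_match_client_class_indices client_indices class_indices (match_client_class_indices client_indices class_indices)

-- ===== LEMMAS AND PROOFS =====

theorem findClass_eq_none (i : Int) (xs : List (Int × List Int)) :
    findClass i xs = none ↔ ∀ p ∈ xs, i ∉ p.2 := by
  induction xs with
  | nil => simp [findClass]
  | cons p rest ih =>
    obtain ⟨l, lst⟩ := p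
    simp only [findClass]
    split_ifs with h
    · simp [h]
    · simp [ih, h]

theorem findClass_mem_of_some (i : Int) (xs : List (Int × List Int)) (l : Int)
    (h : findClass i xs = some l) : l ∈ xs.map Prod.fst := by
  induction xs with
  | nil => simp [findClass] at h
  | cons p rest ih =>
    obtain ⟨l', lst⟩ := p
    simp only [findClass] at h
    split_ifs at h with h'
    · simp at h; simp [h]
    · simp [ih h]

theorem findClass_append (i : Int) (xs ys : List (Int × List Int)) :
    findClass i (xs ++ ys) = (findClass i xs).or (findClass i ys) := by
  induction xs with
  | nil => simp [findClass]
  | cons p rest ih =>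
    obtain ⟨l, lst⟩ := p
    simp only [List.cons_append, findClass]
    split_ifs with h <;> simp [ih]

-- accumulated "earlier" set of B after processing a prefix of classes
def seenSet (pre : List (Int × List Int)) : PySem.Set Int :=
  pre.foldl (fun s p => PySem.Set.update s p.2) PySem.Set.empty

theorem mem_foldl_update (pre : List (Int × List Int)) (s : PySem.Set Int) (i : Int) :
    i ∈ pre.foldl (fun s p => PySem.Set.update s p.2) s ↔ i ∈ s ∨ ∃ p ∈ pre, i ∈ p.2 := by
  induction pre generalizing s with
  | nil => simp
  | cons p rest ih =>
    simp [List.foldl_cons, ih, PySem.Set.mem_update]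
    tauto

theorem mem_seenSet (pre : List (Int × List Int)) (i : Int) :
    i ∈ seenSet pre ↔ ∃ p ∈ pre, i ∈ p.2 := by
  simp [seenSet, mem_foldl_update, PySem.Set.empty]

-- the per-class bucket test of B equals "first class of i is this class"
theorem bucket_test (i c : Int) (lst : List Int) (pre rest : List (Int × List Int))
    (hnd : ((pre ++ (c, lst) :: rest).map Prod.fst).Nodup) :
    (PySem.Set.contains (PySem.Set.ofList lst) i && !(PySem.Set.contains (seenSet pre) i))
      = (findClass i (pre ++ (c, lst) :: rest) == some c) := by
  rw [List.map_append, List.nodup_append] at hnd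
  have hc_pre : c ∉ pre.map Prod.fst := by
    intro hmem
    exact hnd.2.2 c hmem c (by simp) rfl
  have hc_rest : c ∉ rest.map Prod.fst := by
    have h2 := hnd.2.1
    simp only [List.map_cons, List.nodup_cons] at h2
    exact h2.1
  by_cases he : ∃ p ∈ pre, i ∈ p.2
  · have hmem : i ∈ seenSet pre := (mem_seenSet pre i).mpr he
    have hfp : ∃ l, findClass i pre = some l := by
      cases hf : findClass i pre with
      | none =>
        exfalso
        rw [findClass_eq_none] at hf
        obtain ⟨p, hp, hip⟩ := he
        exact hf p hp hip
      | some l => exact ⟨l, rfl⟩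
    obtain ⟨l, hl⟩ := hfp
    have hlc : l ≠ c := fun h => hc_pre (h ▸ findClass_mem_of_some i pre l hl)
    rw [findClass_append, hl]
    simp [Option.or, hmem, hlc]
  · have hnp : findClass i pre = none := by
      rw [findClass_eq_none]
      push_neg at he
      exact he
    have hmem : i ∉ seenSet pre := fun h => he ((mem_seenSet pre i).mp h)
    rw [findClass_append, hnp]
    by_cases hi : i ∈ lst
    · simp [Option.or, findClass, hi, hmem, PySem.Set.mem_ofList]
    · cases hfr : findClass i ((c, lst) :: rest) with
      | none => simp [Option.or, hfr, hi, PySem.Set.mem_ofList]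
      | some l =>
        have hfr' : findClass i rest = some l := by
          simpa [findClass, hi] using hfr
        have hlc : l ≠ c := fun h => hc_rest (h ▸ findClass_mem_of_some i rest l hfr')
        simp [Option.or, hfr, hi, hlc, PySem.Set.mem_ofList]

-- B computes, class by class, the canonical bucket filter
theorem altGo_spec (client : List Int) :
    ∀ (suf pre : List (Int × List Int)),
      ((pre ++ suf).map Prod.fst).Nodup →
      altGo client (seenSet pre) suf
        = suf.map (fun p => (p.1, client.filter (fun i => findClass i (pre ++ suf) == some p.1))) := by
  intro suf
  induction suf with
  | nil => intro pre _; simp [altGo]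
  | cons p rest ih =>
    intro pre hnd
    obtain ⟨c, lst⟩ := p
    simp only [altGo, List.map_cons]
    congr 1
    · congr 1
      apply List.filter_congr
      intro i _
      exact bucket_test i c lst pre rest hnd
    · have hseen : PySem.Set.update (seenSet pre) lst = seenSet (pre ++ [(c, lst)]) := by
        simp [seenSet, List.foldl_append]
      have hassoc : pre ++ (c, lst) :: rest = (pre ++ [(c, lst)]) ++ rest := by simp
      rw [hseen, ih (pre ++ [(c, lst)]) (by rw [← hassoc]; exact hnd)]
      apply List.map_congr_left
      intro q _
      rw [← hassoc]

-- A's client loop is a modify-fold over the (class, index) pairs it appends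
theorem foldA_eq (client : List Int) (cs : List (Int × List Int)) :
    ∀ d : PySem.Dict Int (List Int),
      client.foldl (fun d i =>
        match findClass i cs with
        | some l => d.modify l [] (fun v => v ++ [i])
        | none => d) d
      = (client.filterMap (fun i => (findClass i cs).map (fun l => (l, i)))).foldl
          (fun d p => d.modify p.1 [] (fun v => v ++ [p.2])) d := by
  induction client with
  | nil => intro d; rfl
  | cons i rest ih =>
    intro d
    cases h : findClass i cs with
    | none => simp [List.foldl_cons, h, List.filterMap_cons, ih]
    | some l => simp [List.foldl_cons, h, List.filterMap_cons, ih]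

theorem pairs_filter (client : List Int) (cs : List (Int × List Int)) (c : Int) :
    ((client.filterMap (fun i => (findClass i cs).map (fun l => (l, i)))).filter
        (fun p => p.1 == c)).map Prod.snd
      = client.filter (fun i => findClass i cs == some c) := by
  induction client with
  | nil => rfl
  | cons i rest ih =>
    cases h : findClass i cs with
    | none => simp [List.filterMap_cons, h, List.filter_cons, ih]
    | some l =>
      simp only [List.filterMap_cons, h, Option.map_some, List.filter_cons]
      by_cases hl : l = c
      · subst hl; simp [h, ih]
      · have h1 : ((l, i).1 == c) = false := by simp [hl]
        have h2 : (findClass i cs == some c) = false := by simp [h, hl]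
        simp [h1, h2, ih]

theorem getD_init (cs : List (Int × List Int)) :
    ∀ (d : PySem.Dict Int (List Int)) (c : Int), d.getD c [] = [] →
      (cs.foldl (fun d p => d.insert p.1 ([] : List Int)) d).getD c [] = [] := by
  induction cs with
  | nil => intro d c h; exact h
  | cons p rest ih =>
    intro d c h
    apply ih
    rw [PySem.Dict.getD_insert]
    split_ifs <;> simp [h]

theorem keys_init (cs : List (Int × List Int)) :
    (cs.foldl (fun d p => d.insert p.1 ([] : List Int)) PySem.Dict.empty).keys
      = PySem.Set.ofList (cs.map Prod.fst) := by
  rw [PySem.Dict.keys_foldl_insert_key]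
  simp [PySem.Dict.keys_empty, PySem.Set.update_nil_left]

theorem update_of_subset (s : PySem.Set Int) (xs : List Int) (h : ∀ x ∈ xs, x ∈ s) :
    PySem.Set.update s xs = s := by
  rw [PySem.Set.update_eq_append_filter]
  have : (PySem.Set.ofList xs).filter (fun y => !(PySem.Set.contains s y)) = [] := by
    rw [List.filter_eq_nil_iff]
    intro y hy
    have hy' : y ∈ s := h y ((PySem.Set.mem_ofList xs y).mp hy)
    simp [hy']
  rw [this, List.append_nil]

-- ===== VERDICT (by name: the statement is the Claim_ definition above) =====
theorem match_client_class_indices_spec : Claim_equal_match_client_class_indices := by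
  intro client cs _ hnd
  unfold Pre_match_client_class_indices at hnd
  unfold Spec_match_client_class_indices
  unfold match_client_class_indices match_client_class_indices_alt
  -- B side
  have hB := altGo_spec client cs [] (by simpa using hnd)
  simp only [List.nil_append] at hB
  have hseen0 : seenSet [] = PySem.Set.empty := rfl
  rw [← hseen0, hB]
  -- A side
  show (PySem.Dict.items (List.foldl (fun d i =>
      match findClass i cs with
      | some l => d.modify l [] (fun v => v ++ [i])
      | none => d)
      (List.foldl (fun d p => d.insert p.1 ([] : List Int)) PySem.Dict.empty cs) client)) = _
  rw [foldA_eq]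
  set pairs := client.filterMap (fun i => (findClass i cs).map (fun l => (l, i))) with hpairs
  set d0 := cs.foldl (fun d p => d.insert p.1 ([] : List Int)) PySem.Dict.empty with hd0
  set dfin := pairs.foldl (fun d p => d.modify p.1 [] (fun v => v ++ [p.2])) d0 with hdfin
  have hkeys0 : d0.keys = cs.map Prod.fst := by
    rw [hd0, keys_init]
    exact PySem.Set.ofList_eq_self_of_nodup _ hnd
  have hkeys : dfin.keys = cs.map Prod.fst := by
    rw [hdfin, PySem.Dict.keys_foldl_modify_key, hkeys0]
    apply update_of_subset
    intro x hx
    simp only [hpairs, List.mem_map, List.mem_filterMap] at hx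
    obtain ⟨p, ⟨i, _, hfi⟩, hfst⟩ := hx
    cases h : findClass i cs with
    | none => rw [h] at hfi; simp at hfi
    | some l =>
      rw [h] at hfi; simp at hfi
      rw [← hfst, ← hfi]
      exact findClass_mem_of_some i cs l h
  have hnodup : dfin.keys.Nodup := by rw [hkeys]; exact hnd
  have hgetD : ∀ c, dfin.getD c [] = client.filter (fun i => findClass i cs == some c) := by
    intro c
    rw [hdfin, PySem.Dict.getD_foldl_modify_append, hd0, getD_init cs PySem.Dict.empty c (by simp [PySem.Dict.getD_empty]), pairs_filter]
    simp
  rw [PySem.Dict.items_eq_map_keys dfin hnodup [], hkeys]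
  rw [List.map_map]
  apply List.map_congr_left
  intro p _
  simp [hgetD p.1]
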